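-- pv_equiv track=rewrite | github.com/pypi-data/pypi-mirror-333 | packages/pn-sequence/pn_sequence-0.1.0.tar.gz/pn_sequence-0.1.0/src/pn_sequence/__init__.py | __get_streaks
-- ===== SOURCE A (Python) =====
-- def __get_streaks(sequence):
--     streaks = {}
--     streak = 1
--     i = 0
--
--     while sequence[0] == sequence[len(sequence) - 1]:
--         if i > len(sequence):
--             return {}
--         sequence = sequence[1:] + sequence[0]
--         i += 1
--
--     if sequence[len(sequence) - 1] == "1":
--         sequence += "0"
--     else:
--         sequence += "1"
--
--     for i in range(0, len(sequence) - 1):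
--         if sequence[i] == sequence[i + 1]:
--             streak += 1
--         else:
--             try:
--                 streaks[streak].append(i)
--             except:
--                 streaks[streak] = [i]
--             streak = 1
--
--     return streaks
-- ===== SOURCE B (Python) =====
-- def __get_streaks(sequence):
--     # Instead of rotating the string one char at a time, find in one scan how
--     # many leading chars equal the last char and do a single slice rotation;
--     # then bucket run end-indices in one pass without a sentinel append.
--     n = len(sequence)
--     last = sequence[n - 1]
--     k = 0
--     while k < n and sequence[k] == last:
--         k += 1
--     if k == n:
--         return {}
--     s = sequence[k:] + sequence[:k]
--     streaks = {}
--     start = 0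
--     for i in range(1, n + 1):
--         if i == n or s[i] != s[i - 1]:
--             length = i - start
--             if length in streaks:
--                 streaks[length].append(i - 1)
--             else:
--                 streaks[length] = [i - 1]
--             start = i
--     return streaks
-- ===== Notes on version B (the rewrite author's own statement) =====
-- stated objective: alternative
-- what changed: B replaces A's char-by-char rotation loop by a single scan for the leading run equal to the last char plus one slice rotation, and replaces A's sentinel-append + try/except streak counter by a direct run-boundary pass that records (run length, end index) at each boundary.
import Mathlib
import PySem

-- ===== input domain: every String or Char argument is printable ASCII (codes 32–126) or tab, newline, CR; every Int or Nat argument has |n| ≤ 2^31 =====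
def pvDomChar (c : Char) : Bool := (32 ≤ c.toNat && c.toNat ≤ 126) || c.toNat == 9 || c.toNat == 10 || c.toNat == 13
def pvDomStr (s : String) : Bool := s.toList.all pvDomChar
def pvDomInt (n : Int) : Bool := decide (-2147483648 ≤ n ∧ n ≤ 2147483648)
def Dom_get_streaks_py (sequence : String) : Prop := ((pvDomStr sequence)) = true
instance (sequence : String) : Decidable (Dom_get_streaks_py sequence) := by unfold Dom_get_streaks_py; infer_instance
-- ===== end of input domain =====

-- B replaces A's char-by-char rotation loop by one scan plus one slice, and A's sentinel-append
-- bucketing by a direct run-boundary pass (objective: alternative).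

-- ===== PORT A =====
-- A's while loop: rotate left while first char == last char; none = Python's 'return {}' when the
-- 'i > len' guard fires.  Rotation preserves length, so the guard bounds the recursion.
def pvRotA (s : List Char) (i : Nat) : Option (List Char) :=
  if PySem.List.pyGetD s 0 ' ' = PySem.List.pyGetD s ((s.length : Int) - 1) ' ' then
    if i > s.length then none
    else pvRotA (s.drop 1 ++ s.take 1) (i + 1)
  else some s
termination_by s.length + 2 - i
decreasing_by
  simp only [List.length_append, List.length_drop, List.length_take]
  omega

-- one iteration of A's for loop: state (streaks, streak); try/except bucketing is Dict.modify
def pvStepA (s2 : List Char) (st : PySem.Dict Int (List Int) × Int) (i : Int) :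
    PySem.Dict Int (List Int) × Int :=
  if PySem.List.pyGetD s2 i ' ' = PySem.List.pyGetD s2 (i + 1) ' '
  then (st.1, st.2 + 1)
  else (st.1.modify st.2 [] (· ++ [i]), 1)

def get_streaks_py (sequence : String) : List (Int × List Int) :=
  match pvRotA sequence.toList 0 with
  | none => []
  | some s =>
    -- sentinel append: '0' if the last char is '1', else '1'
    let s2 := s ++ [if PySem.List.pyGetD s ((s.length : Int) - 1) ' ' = '1' then '0' else '1']
    -- for i in range(0, len(sequence) - 1): …
    let res := (PySem.List.pyRange 0 ((s2.length : Int) - 1) 1).foldl (pvStepA s2)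
      (PySem.Dict.empty, 1)
    res.1.items

-- ===== PORT B =====
-- B's leading-run scan: while k < n and sequence[k] == last: k += 1
def pvLeadB (s : List Char) (last : Char) (k : Nat) : Nat :=
  if k < s.length ∧ PySem.List.pyGetD s (k : Int) ' ' = last then pvLeadB s last (k + 1)
  else k
termination_by s.length - k

-- one iteration of B's for loop: state (streaks, start)
def pvStepB (s' : List Char) (n : Nat) (st : PySem.Dict Int (List Int) × Int) (i : Int) :
    PySem.Dict Int (List Int) × Int :=
  if i = (n : Int) ∨ PySem.List.pyGetD s' i ' ' ≠ PySem.List.pyGetD s' (i - 1) ' '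
  then (st.1.modify (i - st.2) [] (· ++ [i - 1]), i)
  else st

def get_streaks_py_alt (sequence : String) : List (Int × List Int) :=
  let s := sequence.toList
  let n := s.length
  let last := PySem.List.pyGetD s ((n : Int) - 1) ' '
  let k := pvLeadB s last 0
  if k = n then []
  else
    -- s = sequence[k:] + sequence[:k]
    let s' := PySem.List.slice s (some (k : Int)) none ++ PySem.List.slice s none (some (k : Int))
    -- for i in range(1, n + 1): record (i - start, i - 1) at each run boundary
    let res := (PySem.List.pyRange 1 ((n : Int) + 1) 1).foldl (pvStepB s' n)
      (PySem.Dict.empty, 0)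
    res.1.items

-- ===== PRECONDITION & SPEC =====
-- Pre_ excludes only the empty string, on which the Python A raises IndexError (sequence[0]).
def Pre_get_streaks_py (sequence : String) : Prop := sequence.toList ≠ []
instance (sequence : String) : Decidable (Pre_get_streaks_py sequence) := by unfold Pre_get_streaks_py; infer_instance
def pvWitness_get_streaks_py : String := "0110"

def Spec_get_streaks_py (sequence : String) (out : List (Int × List Int)) : Prop := out = get_streaks_py_alt sequence
instance (sequence : String) (out : List (Int × List Int)) : Decidable (Spec_get_streaks_py sequence out) := by unfold Spec_get_streaks_py; infer_instance

-- ===== CLAIM (what is proved, stated in full; the proofs are below) =====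
def Claim_equal_get_streaks_py : Prop := ∀ (sequence : String), Dom_get_streaks_py sequence → Pre_get_streaks_py sequence → Spec_get_streaks_py sequence (get_streaks_py sequence)

-- ===== LEMMAS AND PROOFS =====

theorem pvGetD_last (s : List Char) (h : s ≠ []) :
    PySem.List.pyGetD s ((s.length : Int) - 1) ' ' = s.getLast h := by
  have hl : 0 < s.length := List.length_pos_iff.mpr h
  rw [PySem.List.pyGetD_eq_getElem s ' ' (by omega) (by omega)]
  rw [List.getLast_eq_getElem]
  congr 1
  omega

theorem pvGetD_zero (s : List Char) (h : s ≠ []) :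
    PySem.List.pyGetD s 0 ' ' = s.head h := by
  have hl : 0 < s.length := List.length_pos_iff.mpr h
  have h0 : (0 : Int) = ((0 : Nat) : Int) := rfl
  rw [h0, PySem.List.pyGetD_eq_getElem s ' ' (by omega) (by omega)]
  simp [List.head_eq_getElem]

theorem pvLeadB_eq (s : List Char) (c : Char) :
    ∀ k, k ≤ s.length → pvLeadB s c k = k + ((s.drop k).takeWhile (· == c)).length := by
  intro k
  induction k using pvLeadB.induct (s := s) (last := c) with
  | case1 k hcond ih =>
    intro hk
    obtain ⟨hlt, heq⟩ := hcond
    rw [pvLeadB, if_pos ⟨hlt, heq⟩, ih (by omega)]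
    have hdrop : s.drop k = s[k] :: s.drop (k + 1) := List.drop_eq_getElem_cons hlt
    have hgk : s[k] = c := by
      rwa [PySem.List.pyGetD_natCast, List.getD_eq_getElem?_getD, List.getElem?_eq_getElem hlt,
        Option.getD_some] at heq
    rw [hdrop, List.takeWhile_cons, if_pos (by simp [hgk])]
    simp; omega
  | case2 k hcond =>
    intro hk
    rw [pvLeadB, if_neg hcond]
    rcases Nat.lt_or_ge k s.length with hlt | hge
    · have hgk : s[k] ≠ c := by
        intro hc
        exact hcond ⟨hlt, by rw [PySem.List.pyGetD_natCast, List.getD_eq_getElem?_getD,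
          List.getElem?_eq_getElem hlt, Option.getD_some]; exact hc⟩
      rw [List.drop_eq_getElem_cons hlt, List.takeWhile_cons, if_neg (by simp [hgk])]
      simp
    · have : s.drop k = [] := List.drop_eq_nil_of_le hge
      simp [this]

theorem pvRotA_none (s : List Char) (i : Nat) (h : s ≠ [])
    (hall : ∀ x ∈ s, ∀ y ∈ s, x = y) : pvRotA s i = none := by
  induction s, i using pvRotA.induct with
  | case1 s i hcond hguard => rw [pvRotA, if_pos hcond, if_pos hguard]
  | case2 s i hcond hguard ih =>
    rw [pvRotA, if_pos hcond, if_neg hguard]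
    have hne : s.drop 1 ++ s.take 1 ≠ [] := by
      have : (s.drop 1 ++ s.take 1).length = s.length := by simp; omega
      intro hc; rw [hc] at this; simp at this; exact h (List.length_eq_zero_iff.mp this.symm)
    refine ih hne ?_
    intro x hx y hy
    have hx' : x ∈ s := by
      rcases List.mem_append.mp hx with h' | h'
      exacts [(List.drop_subset 1 s) h', (List.take_subset 1 s) h']
    have hy' : y ∈ s := by
      rcases List.mem_append.mp hy with h' | h'
      exacts [(List.drop_subset 1 s) h', (List.take_subset 1 s) h']
    exact hall x hx' y hy'
  | case3 s i hcond =>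
    exfalso
    exact hcond (by rw [pvGetD_zero s h, pvGetD_last s h]
                    exact hall _ (List.head_mem h) _ (List.getLast_mem h))

theorem pvRotA_some : ∀ (k : Nat) (s : List Char) (i : Nat) (h : s ≠ []),
    (s.takeWhile (· == s.getLast h)).length = k → k < s.length → i + k ≤ s.length →
    pvRotA s i = some (s.drop k ++ s.take k) := by
  intro k
  induction k with
  | zero =>
    intro s i h htw hk hik
    have hhead : s.head h ≠ s.getLast h := by
      obtain ⟨a, t, rfl⟩ := List.exists_cons_of_ne_nil h
      simp only [List.head_cons]
      intro hcEq
      rw [List.takeWhile_cons, if_pos (beq_iff_eq.mpr hcEq)] at htw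
      simp at htw
    rw [pvRotA, if_neg (by rw [pvGetD_zero s h, pvGetD_last s h]; exact hhead)]
    simp
  | succ k ih =>
    intro s i h htw hk hik
    obtain ⟨a, t, rfl⟩ := List.exists_cons_of_ne_nil h
    set c := (a :: t).getLast h with hc
    have ha : a = c := by
      by_contra hne
      rw [List.takeWhile_cons] at htw
      simp [hne] at htw
    have hlen : (a :: t).length = t.length + 1 := by simp
    have hkt : k < t.length := by simp at hk; omega
    have htw' : (t.takeWhile (· == c)).length = k := by
      rw [List.takeWhile_cons, if_pos (by simp [ha])] at htw
      simpa using htw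
    rw [pvRotA, if_pos (by
        rw [pvGetD_zero _ h, pvGetD_last _ h, ← hc]
        simp only [List.head_cons]
        exact ha),
      if_neg (by simp at hik ⊢; omega)]
    have hrot : (a :: t).drop 1 ++ (a :: t).take 1 = t ++ [c] := by simp [ha]
    rw [hrot]
    have hne' : t ++ [c] ≠ [] := by simp
    have hlast' : (t ++ [c]).getLast hne' = c := by simp
    have htww : ((t ++ [c]).takeWhile (· == c)).length = k := by
      rw [List.takeWhile_append, if_neg (by omega)]
      exact htw'
    rw [ih (t ++ [c]) (i + 1) hne' (by rw [hlast']; exact htww)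
      (by simp; omega) (by simp; simp at hik; omega)]
    congr 1
    rw [List.drop_append_of_le_length (by omega), List.take_append_of_le_length (by omega)]
    have h1 : (a :: t).drop (k + 1) = t.drop k := by simp
    have h2 : (a :: t).take (k + 1) = a :: t.take k := by simp
    rw [h1, h2, ha]
    simp

theorem pvCount_eq (t : List Char) (h : t ≠ []) (sent : Char) (hs : sent ≠ t.getLast h) :
    ∀ m : Nat, m ≤ t.length →
      ((PySem.List.pyRange 0 (m : Int) 1).foldl (pvStepA (t ++ [sent])) (PySem.Dict.empty, 1)).1
        = ((PySem.List.pyRange 1 ((m : Int) + 1) 1).foldl (pvStepB t t.length) (PySem.Dict.empty, 0)).1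
      ∧ ((PySem.List.pyRange 0 (m : Int) 1).foldl (pvStepA (t ++ [sent])) (PySem.Dict.empty, 1)).2
        = (m : Int) + 1 - ((PySem.List.pyRange 1 ((m : Int) + 1) 1).foldl (pvStepB t t.length) (PySem.Dict.empty, 0)).2 := by
  intro m
  induction m with
  | zero =>
    simp [PySem.List.pyRange_one_eq_nil (by omega : (0:Int) ≤ 0),
      PySem.List.pyRange_one_eq_nil (by omega : (1:Int) ≤ 1)]
  | succ m ih =>
    intro hm
    have hm' : m ≤ t.length := by omega
    obtain ⟨hd, hstrk⟩ := ih hm'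
    have hrA : PySem.List.pyRange 0 ((m : Int) + 1) 1
        = PySem.List.pyRange 0 (m : Int) 1 ++ [(m : Int)] :=
      PySem.List.pyRange_one_succ_right (by omega)
    have hrB : PySem.List.pyRange 1 ((m : Int) + 1 + 1) 1
        = PySem.List.pyRange 1 ((m : Int) + 1) 1 ++ [(m : Int) + 1] :=
      PySem.List.pyRange_one_succ_right (by omega)
    have hcast : ((m + 1 : Nat) : Int) = (m : Int) + 1 := by omega
    rw [hcast, hrA, hrB, List.foldl_append, List.foldl_append]
    set a := (PySem.List.pyRange 0 (m : Int) 1).foldl (pvStepA (t ++ [sent])) (PySem.Dict.empty, 1) with ha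
    set b := (PySem.List.pyRange 1 ((m : Int) + 1) 1).foldl (pvStepB t t.length) (PySem.Dict.empty, 0) with hb
    simp only [List.foldl_cons, List.foldl_nil]
    -- index facts
    have hmlt : m < t.length := by omega
    have hA0 : PySem.List.pyGetD (t ++ [sent]) (m : Int) ' ' = t[m] := by
      rw [PySem.List.pyGetD_natCast]
      rw [List.getD_eq_getElem?_getD, List.getElem?_append_left hmlt,
        List.getElem?_eq_getElem hmlt, Option.getD_some]
    have hcondB_iff : ((m : Int) + 1 = (t.length : Int)
        ∨ PySem.List.pyGetD t ((m : Int) + 1) ' ' ≠ PySem.List.pyGetD t ((m : Int) + 1 - 1) ' ')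
        ↔ ¬ (PySem.List.pyGetD (t ++ [sent]) (m : Int) ' '
             = PySem.List.pyGetD (t ++ [sent]) ((m : Int) + 1) ' ') := by
      rcases Nat.lt_or_ge (m + 1) t.length with hlt | hge
      · -- interior: both compare t[m] and t[m+1]
        have e1 : PySem.List.pyGetD (t ++ [sent]) ((m : Int) + 1) ' ' = t[m + 1] := by
          have : ((m : Int) + 1) = ((m + 1 : Nat) : Int) := by omega
          rw [this, PySem.List.pyGetD_natCast, List.getD_eq_getElem?_getD,
            List.getElem?_append_left hlt, List.getElem?_eq_getElem hlt, Option.getD_some]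
        have e2 : PySem.List.pyGetD t ((m : Int) + 1) ' ' = t[m + 1] := by
          have : ((m : Int) + 1) = ((m + 1 : Nat) : Int) := by omega
          rw [this, PySem.List.pyGetD_natCast, List.getD_eq_getElem?_getD,
            List.getElem?_eq_getElem hlt, Option.getD_some]
        have e3 : PySem.List.pyGetD t ((m : Int) + 1 - 1) ' ' = t[m] := by
          have : ((m : Int) + 1 - 1) = ((m : Nat) : Int) := by omega
          rw [this, PySem.List.pyGetD_natCast, List.getD_eq_getElem?_getD,
            List.getElem?_eq_getElem hmlt, Option.getD_some]
        rw [hA0, e1, e2, e3]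
        constructor
        · rintro (hc | hc)
          · exfalso; omega
          · exact fun hc' => hc (by rw [hc'])
        · intro hc; exact Or.inr (fun hc' => hc (by rw [hc']))
      · -- boundary: m + 1 = length, A compares t[m] with sent which differ
        have hml : m + 1 = t.length := by omega
        have e1 : PySem.List.pyGetD (t ++ [sent]) ((m : Int) + 1) ' ' = sent := by
          have : ((m : Int) + 1) = ((t.length : Nat) : Int) := by omega
          rw [this, PySem.List.pyGetD_natCast, List.getD_eq_getElem?_getD]
          have : (t ++ [sent])[t.length]? = some sent := by
            rw [List.getElem?_append_right (le_refl _)]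
            simp
          rw [this, Option.getD_some]
        have hlastm : t.getLast h = t[m] := by
          rw [List.getLast_eq_getElem]; congr 1; omega
        rw [hA0, e1]
        constructor
        · intro _ hc
          exact hs (by rw [hlastm, hc])
        · intro _
          exact Or.inl (by omega)
    -- now split on the A condition
    by_cases hc : PySem.List.pyGetD (t ++ [sent]) (m : Int) ' '
        = PySem.List.pyGetD (t ++ [sent]) ((m : Int) + 1) ' '
    · rw [pvStepA, if_pos hc, pvStepB, if_neg (by rw [hcondB_iff]; exact not_not_intro hc)]
      exact ⟨hd, by omega⟩
    · rw [pvStepA, if_neg hc, pvStepB, if_pos (hcondB_iff.mpr hc)]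
      constructor
      · simp only [show ((m : Int) + 1 - 1) = (m : Int) from by ring]
        rw [hd, hstrk]
      · simp only
        omega

-- ===== VERDICT (by name: the statement is the Claim_ definition above) =====
theorem get_streaks_py_spec : Claim_equal_get_streaks_py := by
  intro seq _dom hpre
  unfold Spec_get_streaks_py
  have h : seq.toList ≠ [] := hpre
  set s := seq.toList with hsdef
  set c := s.getLast h with hc
  set k := (s.takeWhile (· == c)).length with hk
  have hkle : k ≤ s.length := (List.takeWhile_prefix _).length_le
  have hlead : pvLeadB s (PySem.List.pyGetD s ((s.length : Int) - 1) ' ') 0 = k := by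
    rw [pvGetD_last s h, pvLeadB_eq s c 0 (by omega)]
    simp [hk]
  by_cases hkn : k = s.length
  · -- the whole string is one run: A's guard fires (return {}), B's k = n branch
    have htws : s.takeWhile (· == c) = s := (List.takeWhile_prefix _).eq_of_length hkn
    have hall : ∀ x ∈ s, ∀ y ∈ s, x = y := by
      intro x hx y hy
      have px : (x == c) = true :=
        List.mem_takeWhile_imp (p := (· == c)) (l := s) (by rw [htws]; exact hx)
      have py : (y == c) = true :=
        List.mem_takeWhile_imp (p := (· == c)) (l := s) (by rw [htws]; exact hy)
      exact (beq_iff_eq.mp px).trans (beq_iff_eq.mp py).symm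
    rw [get_streaks_py, get_streaks_py_alt]
    rw [show seq.toList = s from rfl, pvRotA_none s 0 h hall, hlead, if_pos hkn]
  · -- normal case: rotation = single slice, then the two count loops agree
    have hklt : k < s.length := by omega
    set t := s.drop k ++ s.take k with ht
    have hrot : pvRotA s 0 = some t :=
      pvRotA_some k s 0 h hk.symm hklt (by omega)
    have htlen : t.length = s.length := by simp [ht]; omega
    have htne : t ≠ [] := by
      intro hcon
      rw [hcon] at htlen
      simp at htlen
      omega
    have hslice : PySem.List.slice s (some (k : Int)) none
        ++ PySem.List.slice s none (some (k : Int)) = t := by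
      rw [PySem.List.slice_from_natCast, PySem.List.slice_to_natCast]
    set sent := if PySem.List.pyGetD t ((t.length : Int) - 1) ' ' = '1' then '0' else '1' with hsent
    have hsne : sent ≠ t.getLast htne := by
      rw [hsent, pvGetD_last t htne]
      by_cases h1 : t.getLast htne = '1'
      · rw [if_pos h1, h1]; decide
      · rw [if_neg h1]; intro hcon; exact h1 hcon.symm
    rw [get_streaks_py, get_streaks_py_alt]
    rw [show seq.toList = s from rfl, hrot, hlead, if_neg hkn]
    simp only [hslice]
    have hbound : ((t ++ [sent]).length : Int) - 1 = (t.length : Int) := by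
      simp
    rw [hbound]
    simp only [← hsent]
    rw [htlen]
    have := (pvCount_eq t htne sent hsne t.length (le_refl _)).1
    rw [htlen] at this
    rw [this]
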